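-- pv_equiv track=rewrite | github.com/HoangTechCS-Cyber/Py_Private | Buoi_6/Baitap/BaitapLythuyet.py | short_long_str
-- ===== SOURCE A (Python) =====
-- def short_long_str(strings:list[str]) -> dict:
--     shortest = min(strings, key = len)
--     longtest = max(strings, key = len)
--
--     short_word_index = [index for index, value in enumerate(strings) if value == shortest]
--     long_word_index = [index for index, value in enumerate(strings) if value == longtest]
--     return {
--         'ngannhat' : short_word_index[0],
--         'dainhat' : long_word_index[0],
--     }
-- ===== SOURCE B (Python) =====
-- def short_long_str(strings: list[str]) -> dict:
--     if not strings:
--         raise ValueError("short_long_str() arg is an empty sequence")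
--     min_len = max_len = len(strings[0])
--     min_idx = max_idx = 0
--     for i, s in enumerate(strings[1:], 1):
--         n = len(s)
--         if n < min_len:
--             min_len, min_idx = n, i
--         if n > max_len:
--             max_len, max_idx = n, i
--     return {
--         'ngannhat': min_idx,
--         'dainhat': max_idx,
--     }
-- ===== Notes on version B (the rewrite author's own statement) =====
-- stated objective: faster
-- what changed: Replaces A's four passes over the list (min by len, max by len, and two enumerate-filter scans for the first matching index) with a single enumerate loop that tracks min/max length and their first indices via strict comparisons.
import Mathlib
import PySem

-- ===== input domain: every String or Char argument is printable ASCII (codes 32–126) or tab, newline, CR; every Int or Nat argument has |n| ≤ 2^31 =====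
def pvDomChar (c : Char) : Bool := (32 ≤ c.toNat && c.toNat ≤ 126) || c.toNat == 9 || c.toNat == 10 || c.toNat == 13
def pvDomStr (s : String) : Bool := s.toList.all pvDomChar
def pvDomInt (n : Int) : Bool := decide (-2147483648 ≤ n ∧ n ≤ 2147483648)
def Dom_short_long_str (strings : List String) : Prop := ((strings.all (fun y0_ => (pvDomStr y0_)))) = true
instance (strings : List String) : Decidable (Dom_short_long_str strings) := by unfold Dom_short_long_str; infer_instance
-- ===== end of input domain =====

-- B replaces A's four passes over the list (min, max, and two enumerate-filter scans)
-- with one pass keeping (min_len, min_idx, max_len, max_idx); alternative single-pass decomposition.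

-- ===== PORT A =====
-- shortest = min(strings, key=len); longtest = max(strings, key=len);
-- index lists by enumerate-filter; `[0]` is pyGet? (the list is nonempty whenever min() returned,
-- so the .getD 0 never fires under Pre_); the returned dict becomes an association list.
def short_long_str (strings : List String) : List (String × Int) :=
  match PySem.List.min? strings (fun s => PySem.Str.len s) with
  | none => []   -- min() raises ValueError on an empty list; excluded by Pre_
  | some shortest =>
    match PySem.List.max? strings (fun s => PySem.Str.len s) with
    | none => []
    | some longtest =>
      let short_word_index := ((PySem.List.enumerate strings).filter (fun p => p.2 == shortest)).map Prod.fst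
      let long_word_index := ((PySem.List.enumerate strings).filter (fun p => p.2 == longtest)).map Prod.fst
      [("ngannhat", (PySem.List.pyGet? short_word_index 0).getD 0),
       ("dainhat", (PySem.List.pyGet? long_word_index 0).getD 0)]

-- ===== PORT B =====
-- the two independent conditional updates of Source B's loop body
def pvStepMin (st : Int × Int) (p : Int × String) : Int × Int :=
  if PySem.Str.len p.2 < st.1 then (PySem.Str.len p.2, p.1) else st
def pvStepMax (st : Int × Int) (p : Int × String) : Int × Int :=
  if st.1 < PySem.Str.len p.2 then (PySem.Str.len p.2, p.1) else st

def short_long_str_alt (strings : List String) : List (String × Int) :=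
  match strings with
  | [] => []   -- Source B raises ValueError here; excluded by Pre_
  | s0 :: rest =>
    let L0 := PySem.Str.len s0
    let st := (PySem.List.enumerate rest 1).foldl
      (fun st p => (pvStepMin st.1 p, pvStepMax st.2 p)) ((L0, 0), (L0, 0))
    [("ngannhat", st.1.2), ("dainhat", st.2.2)]

-- ===== PRECONDITION & SPEC =====
-- A raises ValueError (min() of an empty sequence) on []; both programs raise there.
def Pre_short_long_str (strings : List String) : Prop := strings ≠ []
instance (strings : List String) : Decidable (Pre_short_long_str strings) := by
  unfold Pre_short_long_str; infer_instance
def pvWitness_short_long_str : List String := ["ab", "c", "def"]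

def Spec_short_long_str (strings : List String) (out : List (String × Int)) : Prop :=
  out = short_long_str_alt strings
instance (strings : List String) (out : List (String × Int)) : Decidable (Spec_short_long_str strings out) := by
  unfold Spec_short_long_str; infer_instance

-- ===== CLAIM (what is proved, stated in full; the proofs are below) =====
def Claim_equal_short_long_str : Prop := ∀ (strings : List String), Dom_short_long_str strings → Pre_short_long_str strings → Spec_short_long_str strings (short_long_str strings)

-- ===== LEMMAS AND PROOFS =====

def pvLen (s : String) : Int := PySem.Str.len s
def pvRun (lt : Int → Int → Prop) [DecidableRel lt] (m : String) (rest : List String) : String :=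
  rest.foldl (fun a x => if lt (pvLen x) (pvLen a) then x else a) m

lemma pv_minaux : ∀ (rest : List String) (m : String),
    List.foldl (fun acc x => match acc with
      | none => some x
      | some m => if PySem.Str.len x < PySem.Str.len m then some x else some m)
      (some m) rest = some (pvRun (· < ·) m rest) := by
  intro rest
  induction rest with
  | nil => intro m; rfl
  | cons x t ih =>
    intro m
    simp only [List.foldl_cons, pvRun, pvLen] at ih ⊢
    split_ifs with h
    · exact ih x
    · exact ih m

lemma pv_minfold : ∀ (rest : List String) (m : String),
    PySem.List.min? (m :: rest) (fun s => PySem.Str.len s) = some (pvRun (· < ·) m rest) := by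
  intro rest m
  simp only [PySem.List.min?, List.foldl_cons]
  have h := pv_minaux rest m
  convert h using 2
  funext acc x
  cases acc <;> rfl

lemma pv_maxaux : ∀ (rest : List String) (m : String),
    List.foldl (fun acc x => match acc with
      | none => some x
      | some m => if PySem.Str.len m < PySem.Str.len x then some x else some m)
      (some m) rest = some (pvRun (fun a b => b < a) m rest) := by
  intro rest
  induction rest with
  | nil => intro m; rfl
  | cons x t ih =>
    intro m
    simp only [List.foldl_cons, pvRun, pvLen] at ih ⊢
    split_ifs with h
    · exact ih x
    · exact ih m

lemma pv_maxfold : ∀ (rest : List String) (m : String),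
    PySem.List.max? (m :: rest) (fun s => PySem.Str.len s) = some (pvRun (fun a b => b < a) m rest) := by
  intro rest m
  simp only [PySem.List.max?, List.foldl_cons]
  have h := pv_maxaux rest m
  convert h using 2
  funext acc x
  cases acc <;> rfl

lemma pv_first : ∀ (pre : List String) (s : Int) (j : Nat) (m : String),
    pre[j]? = some m →
    (∀ k, k < j → ∀ y, pre[k]? = some y → y ≠ m) →
    ∃ tl, ((PySem.List.enumerate pre s).filter (fun p => p.2 == m)).map Prod.fst
            = (s + (j : Int)) :: tl := by
  intro pre
  induction pre with
  | nil => intro s j m h1 _; simp at h1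
  | cons y t ih =>
    intro s j m h1 h2
    cases j with
    | zero =>
      have hy : y = m := by simpa using h1
      subst hy
      refine ⟨((PySem.List.enumerate t (s+1)).filter (fun p => p.2 == y)).map Prod.fst, ?_⟩
      show ((((s, y) :: PySem.List.enumerate t (s+1)).filter (fun p => p.2 == y)).map Prod.fst) = _
      simp
    | succ k =>
      have hy : y ≠ m := h2 0 (Nat.succ_pos k) y (by simp)
      have h1' : t[k]? = some m := by simpa using h1
      have h2' : ∀ i, i < k → ∀ z, t[i]? = some z → z ≠ m := by
        intro i hik z hz
        exact h2 (i+1) (Nat.succ_lt_succ hik) z (by simpa using hz)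
      obtain ⟨tl, htl⟩ := ih (s+1) k m h1' h2'
      refine ⟨tl, ?_⟩
      show ((((s, y) :: PySem.List.enumerate t (s+1)).filter (fun p => p.2 == m)).map Prod.fst) = _
      have hbeq : (y == m) = false := by simpa using hy
      rw [List.filter_cons]
      simp only [hbeq, Bool.false_eq_true, if_false]
      rw [htl]
      congr 1
      push_cast
      ring

lemma pv_loop (lt : Int → Int → Prop) [DecidableRel lt]
    (hirr : ∀ a, ¬ lt a a)
    (htr : ∀ a b c, lt a b → lt b c → lt a c)
    (htot : ∀ a b, ¬ lt a b → ¬ lt b a → a = b) :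
    ∀ (rest pre : List String) (m : String) (j : Nat),
      pre[j]? = some m →
      (∀ k, k < j → ∀ y, pre[k]? = some y → lt (pvLen m) (pvLen y)) →
      (∀ x ∈ pre, ¬ lt (pvLen x) (pvLen m)) →
      ∃ j' : Nat,
        (PySem.List.enumerate rest ((pre.length : Nat) : Int)).foldl
            (fun st p => if lt (pvLen p.2) st.1 then (pvLen p.2, p.1) else st)
            (pvLen m, ((j : Nat) : Int))
          = (pvLen (pvRun lt m rest), ((j' : Nat) : Int)) ∧
        (pre ++ rest)[j']? = some (pvRun lt m rest) ∧
        (∀ k, k < j' → ∀ y, (pre ++ rest)[k]? = some y →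
          lt (pvLen (pvRun lt m rest)) (pvLen y)) := by
  intro rest
  induction rest with
  | nil =>
    intro pre m j h1 h2 h3
    refine ⟨j, by simp [pvRun], by simpa [pvRun] using h1, ?_⟩
    intro k hkj y hy
    simp only [List.append_nil] at hy
    simpa [pvRun] using h2 k hkj y hy
  | cons x t ih =>
    intro pre m j h1 h2 h3
    have hjlen : j < pre.length := (List.getElem?_eq_some_iff.mp h1).1
    have hstep : PySem.List.enumerate (x :: t) ((pre.length : Nat) : Int)
        = (((pre.length : Nat) : Int), x) :: PySem.List.enumerate t (((pre.length : Nat) : Int) + 1) := rfl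
    have hlen' : (((pre.length : Nat) : Int) + 1) = (((pre ++ [x]).length : Nat) : Int) := by
      simp
    have happ : (pre ++ [x]) ++ t = pre ++ (x :: t) := by simp
    by_cases hc : lt (pvLen x) (pvLen m)
    · have h1' : (pre ++ [x])[pre.length]? = some x := by simp
      have h2' : ∀ k, k < pre.length → ∀ y, (pre ++ [x])[k]? = some y → lt (pvLen x) (pvLen y) := by
        intro k hkp y hy
        rw [List.getElem?_append_left hkp] at hy
        have hym : y ∈ pre := by
          rcases List.getElem?_eq_some_iff.mp hy with ⟨hklen, rfl⟩
          exact List.getElem_mem _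
        by_cases hkj : k < j
        · exact htr _ _ _ hc (h2 k hkj y hy)
        · have hnot : ¬ lt (pvLen y) (pvLen m) := h3 y hym
          by_cases hml : lt (pvLen m) (pvLen y)
          · exact htr _ _ _ hc hml
          · have heq : pvLen y = pvLen m := htot _ _ hnot hml
            rw [heq]; exact hc
      have h3' : ∀ y ∈ pre ++ [x], ¬ lt (pvLen y) (pvLen x) := by
        intro y hy
        rcases List.mem_append.mp hy with h | h
        · intro hlt; exact h3 y h (htr _ _ _ hlt hc)
        · have : y = x := by simpa using h
          subst this; exact hirr _
      obtain ⟨j', e1, e2, e3⟩ := ih (pre ++ [x]) x pre.length h1' h2' h3'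
      have hrun : pvRun lt m (x :: t) = pvRun lt x t := by
        simp only [pvRun, List.foldl_cons, if_pos hc]
      refine ⟨j', ?_, ?_, ?_⟩
      · rw [hstep, List.foldl_cons, hrun]
        simp only [if_pos hc]
        rw [hlen']
        exact e1
      · rw [hrun, ← happ]; exact e2
      · rw [hrun]
        intro k hkj y hy
        rw [← happ] at hy
        exact e3 k hkj y hy
    · have h1' : (pre ++ [x])[j]? = some m := by
        rw [List.getElem?_append_left hjlen]; exact h1
      have h2' : ∀ k, k < j → ∀ y, (pre ++ [x])[k]? = some y → lt (pvLen m) (pvLen y) := by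
        intro k hkj y hy
        have hkp : k < pre.length := lt_trans hkj hjlen
        rw [List.getElem?_append_left hkp] at hy
        exact h2 k hkj y hy
      have h3' : ∀ y ∈ pre ++ [x], ¬ lt (pvLen y) (pvLen m) := by
        intro y hy
        rcases List.mem_append.mp hy with h | h
        · exact h3 y h
        · have : y = x := by simpa using h
          subst this; exact hc
      obtain ⟨j', e1, e2, e3⟩ := ih (pre ++ [x]) m j h1' h2' h3'
      have hrun : pvRun lt m (x :: t) = pvRun lt m t := by
        simp only [pvRun, List.foldl_cons, if_neg hc]
      refine ⟨j', ?_, ?_, ?_⟩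
      · rw [hstep, List.foldl_cons, hrun]
        simp only [if_neg hc]
        rw [hlen']
        exact e1
      · rw [hrun, ← happ]; exact e2
      · rw [hrun]
        intro k hkj y hy
        rw [← happ] at hy
        exact e3 k hkj y hy

lemma pv_main : ∀ (s0 : String) (rest : List String),
    short_long_str (s0 :: rest) = short_long_str_alt (s0 :: rest) := by
  intro s0 rest
  have hirr1 : ∀ a : Int, ¬ a < a := fun a => lt_irrefl a
  have htr1 : ∀ a b c : Int, a < b → b < c → a < c := fun a b c => lt_trans
  have htot1 : ∀ a b : Int, ¬ a < b → ¬ b < a → a = b := by intro a b h1 h2; omega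
  have hirr2 : ∀ a : Int, ¬ (fun a b => b < a) a a := fun a => lt_irrefl a
  have htr2 : ∀ a b c : Int, (fun a b => b < a) a b → (fun a b => b < a) b c → (fun a b => b < a) a c := by
    intro a b c h1 h2; exact lt_trans h2 h1
  have htot2 : ∀ a b : Int, ¬ (fun a b => b < a) a b → ¬ (fun a b => b < a) b a → a = b := by
    intro a b h1 h2; simp only at h1 h2; omega
  obtain ⟨j1, e1, g1, l1⟩ := pv_loop (fun a b => a < b) hirr1 htr1 htot1 rest [s0] s0 0
    (by simp) (fun k hk => absurd hk (Nat.not_lt_zero k))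
    (by intro x hx; have : x = s0 := by simpa using hx
        subst this; exact lt_irrefl _)
  obtain ⟨j2, e2, g2, l2⟩ := pv_loop (fun a b => b < a) hirr2 htr2 htot2 rest [s0] s0 0
    (by simp) (fun k hk => absurd hk (Nat.not_lt_zero k))
    (by intro x hx; have : x = s0 := by simpa using hx
        subst this; exact lt_irrefl _)
  have hmin := pv_minfold rest s0
  have hmax := pv_maxfold rest s0
  obtain ⟨tl1, hf1⟩ := pv_first (s0 :: rest) 0 j1 (pvRun (· < ·) s0 rest)
    (by simpa using g1)
    (by intro k hk y hy hEq
        have := l1 k hk y (by simpa using hy)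
        rw [hEq] at this; exact lt_irrefl _ this)
  obtain ⟨tl2, hf2⟩ := pv_first (s0 :: rest) 0 j2 (pvRun (fun a b => b < a) s0 rest)
    (by simpa using g2)
    (by intro k hk y hy hEq
        have := l2 k hk y (by simpa using hy)
        simp only at this
        rw [hEq] at this; exact lt_irrefl _ this)
  have e1' : (PySem.List.enumerate rest 1).foldl pvStepMin (PySem.Str.len s0, 0)
      = (PySem.Str.len (pvRun (· < ·) s0 rest), (j1 : Int)) := by
    have h := e1
    simp only [pvLen, List.length_cons, List.length_nil, Nat.cast_zero] at h
    simpa [pvStepMin] using h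
  have e2' : (PySem.List.enumerate rest 1).foldl pvStepMax (PySem.Str.len s0, 0)
      = (PySem.Str.len (pvRun (fun a b => b < a) s0 rest), (j2 : Int)) := by
    have h := e2
    simp only [pvLen, List.length_cons, List.length_nil, Nat.cast_zero] at h
    simpa [pvStepMax] using h
  -- A side
  simp only [short_long_str, hmin, hmax]
  rw [hf1, hf2]
  -- B side
  simp only [short_long_str_alt]
  rw [PySem.List.foldl_prod_mk (f := pvStepMin) (g := pvStepMax)]
  rw [e1', e2']
  simp [PySem.List.pyGet?, PySem.List.pyIdx?]

-- ===== VERDICT (by name: the statement is the Claim_ definition above) =====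
theorem short_long_str_spec : Claim_equal_short_long_str := by
  unfold Claim_equal_short_long_str
  intro strings _ hpre
  unfold Spec_short_long_str
  cases strings with
  | nil => exact absurd rfl hpre
  | cons s0 rest => exact pv_main s0 rest
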